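-- pv_equiv track=rewrite | github.com/xeype/piespector | src/piespector/app.py | _body_editor_location_from_index
-- ===== SOURCE A (Python) =====
-- def _body_editor_location_from_index(text: str, index: int) -> tuple[int, int]:
--     index = max(0, min(index, len(text)))
--     row = 0
--     column = 0
--     current = 0
--     for chunk in text.splitlines(keepends=True):
--         next_current = current + len(chunk)
--         if index <= next_current:
--             row, column = row, index - current
--             return (row, column)
--         current = next_current
--         row += 1
--     return (row, index - current)
-- ===== SOURCE B (Python) =====
-- def _body_editor_location_from_index(text: str, index: int) -> tuple[int, int]:
--     index = max(0, min(index, len(text)))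
--     ends = []
--     total = 0
--     for chunk in text.splitlines(keepends=True):
--         total += len(chunk)
--         ends.append(total)
--     # binary search: first row whose cumulative end is >= index (bisect_left)
--     lo, hi = 0, len(ends)
--     while lo < hi:
--         mid = (lo + hi) // 2
--         if ends[mid] < index:
--             lo = mid + 1
--         else:
--             hi = mid
--     column = index - (ends[lo - 1] if lo > 0 else 0)
--     return (lo, column)
-- ===== Notes on version B (the rewrite author's own statement) =====
-- stated objective: alternative
-- what changed: B builds a cumulative line-end table once and locates the row with a binary search (bisect_left by hand), instead of A's early-return linear scan that threads row/current through the chunk loop.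
import Mathlib
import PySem

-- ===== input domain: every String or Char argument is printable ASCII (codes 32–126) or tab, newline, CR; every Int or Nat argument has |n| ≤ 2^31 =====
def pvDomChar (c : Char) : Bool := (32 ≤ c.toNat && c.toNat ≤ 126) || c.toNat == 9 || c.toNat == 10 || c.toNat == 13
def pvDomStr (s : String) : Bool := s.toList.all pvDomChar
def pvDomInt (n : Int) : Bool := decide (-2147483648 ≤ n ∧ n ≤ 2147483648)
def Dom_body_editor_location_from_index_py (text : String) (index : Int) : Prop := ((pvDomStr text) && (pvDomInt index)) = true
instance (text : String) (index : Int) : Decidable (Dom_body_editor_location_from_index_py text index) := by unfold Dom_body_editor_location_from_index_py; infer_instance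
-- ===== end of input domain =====

-- B replaces A's early-return linear scan by a cumulative line-end table plus a hand-written
-- binary search (bisect_left); same cost overall, a different decomposition (objective: alternative).


-- ===== PORT A =====
-- hand port of text.splitlines(keepends=True): exact on the task domain, where the only
-- line boundaries Python recognises are '\n', '\r' and the pair '\r\n' (kept on the chunks).
def pvSplitKeep : List Char → List Char → List (List Char)
  | [], cur => if cur.isEmpty then [] else [cur.reverse]
  | '\r' :: '\n' :: rest, cur => (cur.reverse ++ ['\r', '\n']) :: pvSplitKeep rest []
  | c :: rest, cur =>
      if c == '\n' || c == '\r' then (cur.reverse ++ [c]) :: pvSplitKeep rest []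
      else pvSplitKeep rest (c :: cur)

-- A's for-loop over the chunks, threading row / current; early return when index ≤ next_current.
def pvALoop : List (List Char) → Int → Int → Int → Int × Int
  | [], row, current, index => (row, index - current)
  | chunk :: rest, row, current, index =>
      let next_current := current + (chunk.length : Int)
      if index ≤ next_current then (row, index - current)
      else pvALoop rest (row + 1) next_current index

def body_editor_location_from_index_py (text : String) (index : Int) : Int × Int :=
  let index := max 0 (min index (text.toList.length : Int))
  pvALoop (pvSplitKeep text.toList []) 0 0 index

-- ===== PORT B =====
-- B's first loop: append the running total after each chunk (the cumulative-end table).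
def pvBuildEnds : List (List Char) → Int → List Int
  | [], _ => []
  | chunk :: rest, total => (total + (chunk.length : Int)) :: pvBuildEnds rest (total + (chunk.length : Int))

-- B's while-loop: bisect_left written by hand (lo/hi halving).
def pvBisect (ends : List Int) (x : Int) (lo hi : Nat) : Nat :=
  if h : lo < hi then
    let mid := (lo + hi) / 2
    if ends.getD mid 0 < x then pvBisect ends x (mid + 1) hi
    else pvBisect ends x lo mid
  else lo
termination_by hi - lo
decreasing_by all_goals omega

def body_editor_location_from_index_py_alt (text : String) (index : Int) : Int × Int :=
  let index := max 0 (min index (text.toList.length : Int))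
  let ends := pvBuildEnds (pvSplitKeep text.toList []) 0
  let lo := pvBisect ends index 0 ends.length
  let column := index - (if lo > 0 then ends.getD (lo - 1) 0 else 0)
  ((lo : Int), column)

-- ===== PRECONDITION & SPEC =====
def Spec_body_editor_location_from_index_py (text : String) (index : Int) (out : Int × Int) : Prop := out = body_editor_location_from_index_py_alt text index
instance (text : String) (index : Int) (out : Int × Int) : Decidable (Spec_body_editor_location_from_index_py text index out) := by unfold Spec_body_editor_location_from_index_py; infer_instance

-- ===== CLAIM (what is proved, stated in full; the proofs are below) =====
def Claim_equal_body_editor_location_from_index_py : Prop := ∀ (text : String) (index : Int), Dom_body_editor_location_from_index_py text index → Spec_body_editor_location_from_index_py text index (body_editor_location_from_index_py text index)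

-- ===== LEMMAS AND PROOFS =====

-- reference function: first position whose entry is ≥ x (linear form of bisect_left)
def pvFirstGE : List Int → Int → Nat
  | [], _ => 0
  | e :: es, x => if x ≤ e then 0 else pvFirstGE es x + 1

theorem pvFirstGE_le_length (xs : List Int) (x : Int) : pvFirstGE xs x ≤ xs.length := by
  induction xs with
  | nil => simp [pvFirstGE]
  | cons e es ih =>
      have := ih
      simp only [pvFirstGE, List.length_cons]
      split <;> omega

theorem pvFirstGE_lt (xs : List Int) (x : Int) :
    ∀ j (hj : j < xs.length), j < pvFirstGE xs x → xs[j] < x := by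
  induction xs with
  | nil => intro j hj; simp at hj
  | cons e es ih =>
      intro j hj hlt
      simp only [pvFirstGE] at hlt
      split at hlt
      · omega
      · cases j with
        | zero => simpa using by omega
        | succ k => exact ih k (by simpa using hj) (by omega)

theorem pvFirstGE_ge (xs : List Int) (x : Int) (h : pvFirstGE xs x < xs.length) :
    x ≤ xs[pvFirstGE xs x] := by
  induction xs with
  | nil => simp [pvFirstGE] at h
  | cons e es ih =>
      by_cases hx : x ≤ e
      · simp only [pvFirstGE, if_pos hx] at h ⊢
        simpa using hx
      · simp only [pvFirstGE, if_neg hx] at h ⊢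
        simpa using ih (by simpa using h)

-- first-ge position of cons, needed for the head-lt case
theorem pvFirstGE_cons_of_lt (e : Int) (es : List Int) (x : Int) (h : e < x) :
    pvFirstGE (e :: es) x = pvFirstGE es x + 1 := by
  simp only [pvFirstGE]; split <;> omega

theorem pvFirstGE_cons_of_le (e : Int) (es : List Int) (x : Int) (h : x ≤ e) :
    pvFirstGE (e :: es) x = 0 := by
  simp only [pvFirstGE]; split <;> omega

-- the binary search equals the linear reference on a sorted list
theorem pvBisect_eq_firstGE (ends : List Int) (x : Int)
    (hs : List.Pairwise (· ≤ ·) ends) :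
    ∀ fuel lo hi, hi - lo ≤ fuel → lo ≤ hi → hi ≤ ends.length →
      (∀ j (hj : j < ends.length), j < lo → ends[j] < x) →
      (∀ j (hj : j < ends.length), hi ≤ j → x ≤ ends[j]) →
      pvBisect ends x lo hi = pvFirstGE ends x := by
  have hmono : ∀ i j (hi : i < ends.length) (hj : j < ends.length), i ≤ j → ends[i] ≤ ends[j] := by
    intro i j hi hj hij
    rcases Nat.lt_or_ge i j with h | h
    · exact (List.pairwise_iff_getElem.mp hs) i j hi hj h
    · have : i = j := by omega
      subst this; rfl
  intro fuel
  induction fuel with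
  | zero =>
      intro lo hi hf hlh hhl hlow hhigh
      have : lo = hi := by omega
      subst this
      rw [pvBisect, dif_neg (Nat.lt_irrefl _)]
      -- lo = firstGE by antisymmetry
      have h1 := pvFirstGE_le_length ends x
      rcases Nat.lt_trichotomy lo (pvFirstGE ends x) with h | h | h
      · exfalso
        have hlo_lt : lo < ends.length := by omega
        have := pvFirstGE_lt ends x lo hlo_lt h
        have := hhigh lo hlo_lt (by omega)
        omega
      · exact h
      · exfalso
        have hf_lt : pvFirstGE ends x < ends.length := by omega
        have := hlow (pvFirstGE ends x) hf_lt h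
        have := pvFirstGE_ge ends x hf_lt
        omega
  | succ n ih =>
      intro lo hi hf hlh hhl hlow hhigh
      by_cases h : lo < hi
      · rw [pvBisect]
        simp only [dif_pos h]
        have hmid1 : lo ≤ (lo + hi) / 2 := by omega
        have hmid2 : (lo + hi) / 2 < hi := by omega
        have hmidlen : (lo + hi) / 2 < ends.length := by omega
        rw [List.getD_eq_getElem ends 0 hmidlen]
        split
        · apply ih ((lo + hi) / 2 + 1) hi (by omega) (by omega) hhl
          · intro j hj hjlt
            rcases Nat.lt_or_ge j lo with hc | hc
            · exact hlow j hj hc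
            · calc ends[j] ≤ ends[(lo + hi) / 2] := hmono j _ hj hmidlen (by omega)
                _ < x := by assumption
          · exact hhigh
        · apply ih lo ((lo + hi) / 2) (by omega) (by omega) (by omega) hlow
          intro j hj hjge
          calc x ≤ ends[(lo + hi) / 2] := by omega
            _ ≤ ends[j] := hmono _ j hmidlen hj hjge
      · exact ih lo hi (by omega) hlh hhl hlow hhigh

-- the cumulative-end table is ≥ its starting total everywhere, and sorted
theorem pvBuildEnds_lb (chunks : List (List Char)) (total : Int) :
    ∀ e ∈ pvBuildEnds chunks total, total ≤ e := by
  induction chunks generalizing total with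
  | nil => simp [pvBuildEnds]
  | cons c cs ih =>
      intro e he
      simp only [pvBuildEnds, List.mem_cons] at he
      rcases he with rfl | he
      · omega
      · have := ih (total + (c.length : Int)) e he
        omega

theorem pvBuildEnds_sorted (chunks : List (List Char)) (total : Int) :
    List.Pairwise (· ≤ ·) (pvBuildEnds chunks total) := by
  induction chunks generalizing total with
  | nil => simp [pvBuildEnds]
  | cons c cs ih =>
      simp only [pvBuildEnds]
      refine List.Pairwise.cons ?_ (ih _)
      intro e he
      have := pvBuildEnds_lb cs (total + (c.length : Int)) e he
      omega

-- A's scan in terms of the reference first-ge position on the cumulative table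
theorem pvALoop_eq (chunks : List (List Char)) (x : Int) :
    ∀ row current,
      pvALoop chunks row current x =
        (row + (pvFirstGE (pvBuildEnds chunks current) x : Int),
         x - (if pvFirstGE (pvBuildEnds chunks current) x > 0
              then (pvBuildEnds chunks current).getD (pvFirstGE (pvBuildEnds chunks current) x - 1) 0
              else current)) := by
  induction chunks with
  | nil => intro row current; simp [pvALoop, pvBuildEnds, pvFirstGE]
  | cons c cs ih =>
      intro row current
      simp only [pvALoop, pvBuildEnds]
      by_cases h : x ≤ current + (c.length : Int)
      · rw [if_pos h, pvFirstGE_cons_of_le _ _ _ h]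
        simp
      · rw [if_neg h, pvFirstGE_cons_of_lt _ _ _ (by omega), ih]
        have hgd : ((current + (c.length : Int)) :: pvBuildEnds cs (current + (c.length : Int))).getD
            (pvFirstGE (pvBuildEnds cs (current + (c.length : Int))) x + 1 - 1) 0 =
            (if pvFirstGE (pvBuildEnds cs (current + (c.length : Int))) x > 0
             then (pvBuildEnds cs (current + (c.length : Int))).getD
                    (pvFirstGE (pvBuildEnds cs (current + (c.length : Int))) x - 1) 0
             else current + (c.length : Int)) := by
          set f := pvFirstGE (pvBuildEnds cs (current + (c.length : Int))) x with hf
          rcases Nat.eq_zero_or_pos f with h0 | h0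
          · simp [h0]
          · rw [if_pos h0]
            have : f + 1 - 1 = (f - 1) + 1 := by omega
            rw [this, List.getD_cons_succ]
        rw [hgd, if_pos (Nat.succ_pos _)]
        simp only [Prod.mk.injEq]
        refine ⟨by push_cast; ring, trivial⟩

-- ===== VERDICT (by name: the statement is the Claim_ definition above) =====
theorem body_editor_location_from_index_py_spec : Claim_equal_body_editor_location_from_index_py := by
  intro text index _
  unfold Spec_body_editor_location_from_index_py
  simp only [body_editor_location_from_index_py, body_editor_location_from_index_py_alt]
  set x := max 0 (min index (text.toList.length : Int)) with hx
  set chunks := pvSplitKeep text.toList [] with hc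
  set ends := pvBuildEnds chunks 0 with he
  rw [pvALoop_eq chunks x 0 0,
    pvBisect_eq_firstGE ends x (pvBuildEnds_sorted chunks 0) ends.length 0 ends.length
      (by omega) (by omega) (le_refl _) (by intro j hj hlt; omega) (by intro j hj hge; omega)]
  simp [he]
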